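-- pv_equiv track=rewrite | github.com/ChristopherG19/UVG_HBase_Simulation | ddl/functions.py | disableTable
-- ===== SOURCE A (Python) =====
-- def get_info(command):
--     try:
--         infoValues = command.split(" ", 1)[1]
--     except:
--         return (None, "Sintaxis inválida: Argumentos faltantes")
--     dataInfo = infoValues.split(",", 1)
--     TableName = dataInfo[0].replace("'", "").replace('"', '')
--     return (TableName, dataInfo)
--
-- def get_table(Hfiles, command):
--     Table = None
--     TableName = get_info(command)[0]
--     if(TableName == None):
--         return Table
--
--     for region in Hfiles:
--         for table in Hfiles[region]:
--             if table == TableName: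
--                 Table = Hfiles[region]
--
--     return Table
--
-- def exists(Hfiles, command):
--     exist = False
--     if (get_table(Hfiles, command) != None):
--         exist = True
--     return exist
--
-- def disableTable(Hfiles, command, timestamp):
--     TableName = get_info(command)[0]
--     if(TableName == None):
--         return (get_info(command)[1], None, Hfiles)
--
--     if(not exists(Hfiles, command)):
--         return ("not found, no changes", TableName, Hfiles)
--
--     for region in Hfiles:
--         for table in Hfiles[region]:
--             if(TableName == table):
--                 if "enabled" in Hfiles[region][table] and Hfiles[region][table]["enabled"] == "True":
--                     Hfiles[region][table]["timestamp"] = timestamp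
--                     Hfiles[region][table]["enabled"] = "False"
--                     return ("disabled", TableName, Hfiles)
--                 else:
--                     return ("Already disabled", TableName, Hfiles)
-- ===== SOURCE B (Python) =====
-- def disableTable(Hfiles, command, timestamp):
--     parts = command.split(" ", 1)
--     if len(parts) < 2:
--         return ("Sintaxis inválida: Argumentos faltantes", None, Hfiles)
--     name = parts[1].split(",", 1)[0].replace("'", "").replace('"', '')
--     for tables in Hfiles.values():
--         if name in tables:
--             attrs = tables[name]
--             if attrs.get("enabled") == "True":
--                 attrs["timestamp"] = timestamp
--                 attrs["enabled"] = "False"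
--                 return ("disabled", name, Hfiles)
--             return ("Already disabled", name, Hfiles)
--     return ("not found, no changes", name, Hfiles)
-- ===== Notes on version B (the rewrite author's own statement) =====
-- stated objective: simpler
-- what changed: B parses the name once and does a single early-exiting pass over the regions using dict membership/lookup, removing A's get_table/exists double scan and its re-parse of the command, and returning 'not found' when the pass ends.
import Mathlib
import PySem

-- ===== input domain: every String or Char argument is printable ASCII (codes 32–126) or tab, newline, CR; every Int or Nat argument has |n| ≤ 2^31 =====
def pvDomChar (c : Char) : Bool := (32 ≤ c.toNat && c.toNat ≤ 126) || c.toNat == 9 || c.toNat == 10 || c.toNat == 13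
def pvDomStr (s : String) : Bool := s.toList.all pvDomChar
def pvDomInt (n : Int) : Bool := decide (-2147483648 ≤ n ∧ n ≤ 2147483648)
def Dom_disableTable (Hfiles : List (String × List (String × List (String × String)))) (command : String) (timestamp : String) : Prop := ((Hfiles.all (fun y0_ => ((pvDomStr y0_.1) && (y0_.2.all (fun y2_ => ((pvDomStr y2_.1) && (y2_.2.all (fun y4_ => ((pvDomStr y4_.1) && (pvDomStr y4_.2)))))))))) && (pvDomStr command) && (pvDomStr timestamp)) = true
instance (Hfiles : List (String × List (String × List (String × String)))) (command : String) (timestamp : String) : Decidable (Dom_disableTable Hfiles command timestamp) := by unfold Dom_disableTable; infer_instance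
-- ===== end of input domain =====

-- B replaces A's get_table/exists double scan (plus re-parse) by one early-exiting pass
-- over the regions with dict membership; equivalence is about the RETURN value (the Python A
-- mutates the found attrs dict in place, and so does B).
-- Dicts arrive as assoc lists iterated pairwise, as Python iterates a dict's unique keys.

-- ===== PORT A =====
-- get_info(command)[0]; the [1] component is only used in disableTable's None branch, where
-- it is the literal error string, inlined there.  dataInfo[0] never raises (split of a
-- nonempty sep returns at least one piece), so `.getD 0 ""` is exact; likewise splitMax?
-- never returns none for the literal nonempty separators, so `.getD []` is exact.
def pvGetInfoA (command : String) : Option String :=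
  match PySem.List.pyGet? ((PySem.Str.splitMax? command " " 1).getD []) 1 with
  | none => none
  | some infoValues =>
    some (PySem.Str.replace (PySem.Str.replace
      (((PySem.Str.splitMax? infoValues "," 1).getD []).getD 0 "") "'" "") "\"" "")

-- get_table: nested for-loops keeping the LAST matching region's table dict
def pvGetTableA (Hfiles : List (String × List (String × List (String × String))))
    (command : String) : Option (List (String × List (String × String))) :=
  match pvGetInfoA command with
  | none => none
  | some tn =>
    Hfiles.foldl
      (fun acc region =>
        region.2.foldl (fun acc2 t => if t.1 == tn then some region.2 else acc2) acc)
      none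

def pvExistsA (Hfiles : List (String × List (String × List (String × String))))
    (command : String) : Bool :=
  if pvGetTableA Hfiles command ≠ none then true else false

-- disableTable's inner `for table in Hfiles[region]` loop; `full` is Hfiles[region]
def pvInnerA (tn ts : String) (full : List (String × List (String × String))) :
    List (String × List (String × String)) → Option (String × List (String × List (String × String)))
  | [] => none
  | t :: rest =>
    if tn == t.1 then
      let attrs := PySem.Dict.getD (PySem.Dict.mk full) tn []
      if PySem.Dict.get? (PySem.Dict.mk attrs) "enabled" == some "True" then
        let attrs' := (PySem.Dict.insert (PySem.Dict.insert (PySem.Dict.mk attrs) "timestamp" ts) "enabled" "False").items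
        some ("disabled", (PySem.Dict.insert (PySem.Dict.mk full) tn attrs').items)
      else some ("Already disabled", full)
    else pvInnerA tn ts full rest

-- disableTable's outer `for region in Hfiles` loop, rebuilding Hfiles with the one mutated region
def pvOuterA (tn ts : String) :
    List (String × List (String × List (String × String))) →
      Option (String × List (String × List (String × List (String × String))))
  | [] => none
  | (rname, tables) :: rest =>
    match pvInnerA tn ts tables tables with
    | some p => some (p.1, (rname, p.2) :: rest)
    | none =>
      match pvOuterA tn ts rest with
      | some q => some (q.1, (rname, tables) :: q.2)
      | none => none

def disableTable (Hfiles : List (String × List (String × List (String × String)))) (command : String) (timestamp : String) : String × Option String × (List (String × List (String × List (String × String)))) :=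
  match pvGetInfoA command with
  | none => ("Sintaxis inválida: Argumentos faltantes", none, Hfiles)
  | some tn =>
    if pvExistsA Hfiles command = false then ("not found, no changes", some tn, Hfiles)
    else
      match pvOuterA tn timestamp Hfiles with
      | some p => (p.1, some tn, p.2)
      | none => ("not found, no changes", some tn, Hfiles)  -- unreachable: the exists guard found a match

-- ===== PORT B =====
def pvParseB (command : String) : Option String :=
  let parts := (PySem.Str.splitMax? command " " 1).getD []
  if parts.length < 2 then none
  else
    some (PySem.Str.replace (PySem.Str.replace
      (((PySem.Str.splitMax? (parts.getD 1 "") "," 1).getD []).getD 0 "") "'" "") "\"" "")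

-- the single early-exiting pass over Hfiles.values()
def pvLoopB (name ts : String) :
    List (String × List (String × List (String × String))) →
      Option (String × List (String × List (String × List (String × String))))
  | [] => none
  | (r, tables) :: rest =>
    if (PySem.Dict.get? (PySem.Dict.mk tables) name).isSome then
      let attrs := PySem.Dict.getD (PySem.Dict.mk tables) name []
      if PySem.Dict.get? (PySem.Dict.mk attrs) "enabled" == some "True" then
        some ("disabled",
          (r, (PySem.Dict.insert (PySem.Dict.mk tables) name
                ((PySem.Dict.insert (PySem.Dict.insert (PySem.Dict.mk attrs) "timestamp" ts) "enabled" "False").items)).items) :: rest)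
      else some ("Already disabled", (r, tables) :: rest)
    else (pvLoopB name ts rest).map (fun p => (p.1, (r, tables) :: p.2))

def disableTable_alt (Hfiles : List (String × List (String × List (String × String)))) (command : String) (timestamp : String) : String × Option String × (List (String × List (String × List (String × String)))) :=
  match pvParseB command with
  | none => ("Sintaxis inválida: Argumentos faltantes", none, Hfiles)
  | some name =>
    match pvLoopB name timestamp Hfiles with
    | some p => (p.1, some name, p.2)
    | none => ("not found, no changes", some name, Hfiles)

-- ===== PRECONDITION & SPEC =====
def Spec_disableTable (Hfiles : List (String × List (String × List (String × String)))) (command : String) (timestamp : String) (out : String × Option String × (List (String × List (String × List (String × String))))) : Prop := out = disableTable_alt Hfiles command timestamp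
instance (Hfiles : List (String × List (String × List (String × String)))) (command : String) (timestamp : String) (out : String × Option String × (List (String × List (String × List (String × String))))) : Decidable (Spec_disableTable Hfiles command timestamp out) := by
  unfold Spec_disableTable
  letI h1 : DecidableEq (List (String × List (String × String))) := inferInstance
  letI h2 : DecidableEq (List (String × List (String × List (String × String)))) := inferInstance
  infer_instance

-- ===== CLAIM (what is proved, stated in full; the proofs are below) =====
def Claim_equal_disableTable : Prop := ∀ (Hfiles : List (String × List (String × List (String × String)))) (command : String) (timestamp : String), Dom_disableTable Hfiles command timestamp → Spec_disableTable Hfiles command timestamp (disableTable Hfiles command timestamp)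

-- ===== LEMMAS AND PROOFS =====

-- the two parses agree
theorem pvParse_eq (command : String) : pvGetInfoA command = pvParseB command := by
  unfold pvGetInfoA pvParseB
  rcases h : (PySem.Str.splitMax? command " " 1).getD [] with _ | ⟨a, _ | ⟨b, l⟩⟩ <;>
    simp [PySem.List.pyGet?, PySem.List.pyIdx?]

-- value produced at a hit, shared by both ports
def pvHit (tn ts : String) (full : List (String × List (String × String))) :
    String × List (String × List (String × String)) :=
  let attrs := PySem.Dict.getD (PySem.Dict.mk full) tn []
  if PySem.Dict.get? (PySem.Dict.mk attrs) "enabled" == some "True" then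
    ("disabled",
      (PySem.Dict.insert (PySem.Dict.mk full) tn
        ((PySem.Dict.insert (PySem.Dict.insert (PySem.Dict.mk attrs) "timestamp" ts) "enabled" "False").items)).items)
  else ("Already disabled", full)

theorem pvInnerA_eq (tn ts : String) (full tables : List (String × List (String × String))) :
    pvInnerA tn ts full tables =
      if tables.any (fun t => t.1 == tn) then some (pvHit tn ts full) else none := by
  induction tables with
  | nil => simp [pvInnerA]
  | cons t rest ih =>
    by_cases h : t.1 = tn
    · simp only [pvInnerA, List.any_cons, h, beq_self_eq_true, Bool.true_or, if_true]
      simp [pvHit]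
      split <;> rfl
    · have h2 : (tn == t.1) = false := by simp [Ne.symm h]
      have h3 : (t.1 == tn) = false := by simp [h]
      simp only [pvInnerA, h2, Bool.false_eq_true, if_false, ih, List.any_cons, h3,
        Bool.false_or]

theorem pvGet?_isSome_eq_any {ν : Type} (tables : List (String × ν)) (name : String) :
    (PySem.Dict.get? (PySem.Dict.mk tables) name).isSome = tables.any (fun t => t.1 == name) := by
  induction tables with
  | nil => simp [PySem.Dict.get?]
  | cons t rest ih =>
    rw [show (PySem.Dict.mk (t :: rest) : PySem.Dict String ν) = PySem.Dict.mk ((t.1, t.2) :: rest) by rfl]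
    rw [PySem.Dict.get?_mk_cons]
    by_cases h : t.1 = name
    · simp [h]
    · simp [h, ih]

-- the two disabling passes agree
theorem pvOuter_eq (tn ts : String) (l : List (String × List (String × List (String × String)))) :
    pvOuterA tn ts l = pvLoopB tn ts l := by
  induction l with
  | nil => rfl
  | cons r rest ih =>
    rcases r with ⟨rname, tables⟩
    simp only [pvOuterA, pvLoopB, pvInnerA_eq, pvGet?_isSome_eq_any, ← ih]
    by_cases h : (tables.any fun t => t.1 == tn) = true
    · simp only [h, if_true]
      simp only [pvHit]
      split <;> rfl
    · have hf : (tables.any fun t => t.1 == tn) = false := Bool.eq_false_iff.mpr h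
      simp only [hf, Bool.false_eq_true, if_false]
      cases pvOuterA tn ts rest <;> simp

-- none-characterisation of the pass (independent of ts)
theorem pvLoopB_none_iff (tn ts : String) (l : List (String × List (String × List (String × String)))) :
    pvLoopB tn ts l = none ↔ ∀ r ∈ l, r.2.any (fun t => t.1 == tn) = false := by
  induction l with
  | nil => simp [pvLoopB]
  | cons r rest ih =>
    rcases r with ⟨rname, tables⟩
    rw [List.forall_mem_cons]
    simp only [pvLoopB, pvGet?_isSome_eq_any]
    by_cases h : (tables.any fun t => t.1 == tn) = true
    · by_cases h2 : PySem.Dict.get? (PySem.Dict.mk (PySem.Dict.getD (PySem.Dict.mk tables) tn [])) "enabled" = some "True" <;>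
        simp only [h, h2, if_true, Bool.true_eq_false] <;> simp [h2]
    · have hf : (tables.any fun t => t.1 == tn) = false := Bool.eq_false_iff.mpr h
      simp only [hf, Bool.false_eq_true, if_false]
      rw [Option.map_eq_none_iff, ih]
      simp

-- get_table's inner foldl keeps some region.2 iff a key matches
theorem pvInnerFold_eq (tn : String) (v : List (String × List (String × String)))
    (ts : List (String × List (String × String)))
    (acc : Option (List (String × List (String × String)))) :
    ts.foldl (fun acc2 t => if t.1 == tn then some v else acc2) acc =
      if ts.any (fun t => t.1 == tn) then some v else acc := by
  induction ts generalizing acc with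
  | nil => simp
  | cons t rest ih =>
    simp only [List.foldl_cons, List.any_cons, ih]
    by_cases h : t.1 = tn
    · simp [h]
    · have h3 : (t.1 == tn) = false := by simp [h]
      simp only [h3, Bool.false_or, if_false, Bool.false_eq_true]

-- get_table's outer foldl is none iff acc is none and no region has the key
theorem pvGetTableFold_none_iff (tn : String)
    (l : List (String × List (String × List (String × String))))
    (acc : Option (List (String × List (String × String)))) :
    (l.foldl (fun acc region =>
        region.2.foldl (fun acc2 t => if t.1 == tn then some region.2 else acc2) acc) acc = none)
      ↔ (acc = none ∧ ∀ r ∈ l, r.2.any (fun t => t.1 == tn) = false) := by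
  induction l generalizing acc with
  | nil => simp
  | cons r rest ih =>
    rw [List.foldl_cons, ih, pvInnerFold_eq, List.forall_mem_cons]
    by_cases h : r.2.any (fun t => t.1 == tn) = true
    · simp only [h, if_true, Bool.true_eq_false]
      simp
    · have hf : r.2.any (fun t => t.1 == tn) = false := Bool.eq_false_iff.mpr h
      simp only [hf, Bool.false_eq_true, if_false]
      simp

-- ===== VERDICT (by name: the statement is the Claim_ definition above) =====
theorem disableTable_spec : Claim_equal_disableTable := by
  intro Hfiles command timestamp _
  unfold Spec_disableTable disableTable disableTable_alt pvExistsA pvGetTableA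
  rw [pvParse_eq]
  cases h : pvParseB command with
  | none => rfl
  | some tn =>
    cases hb : pvLoopB tn timestamp Hfiles with
    | none =>
      have hall := (pvLoopB_none_iff tn timestamp Hfiles).mp hb
      have hfold := (pvGetTableFold_none_iff tn Hfiles none).mpr ⟨rfl, hall⟩
      simp only [beq_iff_eq] at hfold
      simp [hfold, hb]
    | some p =>
      have hfold : ¬ (Hfiles.foldl (fun acc region =>
          region.2.foldl (fun acc2 t => if t.1 == tn then some region.2 else acc2) acc) none = none) := by
        intro hc
        have h1 := ((pvGetTableFold_none_iff tn Hfiles none).mp hc).2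
        have h2 := (pvLoopB_none_iff tn timestamp Hfiles).mpr h1
        rw [hb] at h2
        cases h2
      simp only [beq_iff_eq] at hfold
      simp [hfold, pvOuter_eq, hb]
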